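-- pv_equiv track=rewrite | github.com/Nishant040305/Dot-Boxes | src/gameSimulation/arena.py | _bits_to_2d
-- ===== SOURCE A (Python) =====
-- def _bits_to_2d(bitmask, rows, cols):
--     """Convert bitmask to 2D list."""
--     result = []
--     for r in range(rows):
--         row = []
--         for c in range(cols):
--             row.append(bool(bitmask & (1 << (r * cols + c))))
--         result.append(row)
--     return result
-- ===== SOURCE B (Python) =====
-- def _bits_to_2d(bitmask, rows, cols):
--     """Convert bitmask to 2D list by consuming the mask LSB-first with divmod,
--     instead of computing a shift/AND for every cell."""
--     result = []
--     m = bitmask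
--     for _ in range(rows):
--         row = []
--         for _ in range(cols):
--             m, b = divmod(m, 2)
--             row.append(bool(b))
--         result.append(row)
--     return result
-- ===== Notes on version B (the rewrite author's own statement) =====
-- stated objective: faster
-- what changed: Instead of testing each cell with a fresh shift-and-AND (bitmask & (1 << (r*cols+c))), B consumes the mask sequentially LSB-first with divmod(m, 2), carrying the shrinking remainder through the loops so no per-cell mask construction or full-width AND is needed.
import Mathlib
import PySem

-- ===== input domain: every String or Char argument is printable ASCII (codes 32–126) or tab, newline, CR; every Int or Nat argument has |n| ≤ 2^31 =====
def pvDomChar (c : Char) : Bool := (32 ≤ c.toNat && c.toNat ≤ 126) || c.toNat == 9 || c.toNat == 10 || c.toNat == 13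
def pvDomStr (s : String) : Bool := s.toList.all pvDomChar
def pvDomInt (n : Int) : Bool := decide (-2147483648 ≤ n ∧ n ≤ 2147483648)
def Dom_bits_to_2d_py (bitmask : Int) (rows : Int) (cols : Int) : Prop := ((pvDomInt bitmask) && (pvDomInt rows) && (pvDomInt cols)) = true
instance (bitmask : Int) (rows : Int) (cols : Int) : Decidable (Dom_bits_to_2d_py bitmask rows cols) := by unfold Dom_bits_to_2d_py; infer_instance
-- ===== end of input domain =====

-- B replaces A's per-cell shift-and-AND bit test by consuming the mask LSB-first with divmod(m, 2)
-- carried through the loops, so no per-cell mask is built (objective: faster; measured).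

-- ===== PORT A =====
-- for r in range(rows): for c in range(cols): row.append(bool(bitmask & (1 << (r*cols+c))))
-- (inside the inner loop r ≥ 0 and 0 ≤ c < cols, so the shift amount r*cols+c is ≥ 0 and .toNat is exact)
def bits_to_2d_py (bitmask : Int) (rows : Int) (cols : Int) : List (List Bool) :=
  (PySem.List.pyRange 0 rows 1).foldl (fun result r =>
    result ++ [(PySem.List.pyRange 0 cols 1).foldl (fun row c =>
      row ++ [PySem.Int.band bitmask ((1 : Int) <<< (r * cols + c).toNat) != 0]) []]) []

-- ===== PORT B =====
-- m = bitmask; for _ in range(rows): for _ in range(cols): m, b = divmod(m, 2); row.append(bool(b))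
def bits_to_2d_py_alt (bitmask : Int) (rows : Int) (cols : Int) : List (List Bool) :=
  ((PySem.List.pyRange 0 rows 1).foldl (fun (st : Int × List (List Bool)) _ =>
    let inner := (PySem.List.pyRange 0 cols 1).foldl (fun (st2 : Int × List Bool) _ =>
      (PySem.Int.floordiv st2.1 2, st2.2 ++ [PySem.Int.mod st2.1 2 != 0])) (st.1, [])
    (inner.1, st.2 ++ [inner.2])) (bitmask, [])).2

-- ===== PRECONDITION & SPEC =====
def Spec_bits_to_2d_py (bitmask : Int) (rows : Int) (cols : Int) (out : List (List Bool)) : Prop := out = bits_to_2d_py_alt bitmask rows cols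
instance (bitmask : Int) (rows : Int) (cols : Int) (out : List (List Bool)) : Decidable (Spec_bits_to_2d_py bitmask rows cols out) := by unfold Spec_bits_to_2d_py; infer_instance

-- ===== CLAIM (what is proved, stated in full; the proofs are below) =====
def Claim_equal_bits_to_2d_py : Prop := ∀ (bitmask : Int) (rows : Int) (cols : Int), Dom_bits_to_2d_py bitmask rows cols → Spec_bits_to_2d_py bitmask rows cols (bits_to_2d_py bitmask rows cols)

-- ===== LEMMAS AND PROOFS =====

-- Int.testBit at bit 0 is the parity
theorem pv_tb0 (m : Int) : Int.testBit m 0 = decide (m % 2 = 1) := by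
  cases m with
  | ofNat n => simp only [Int.testBit, Nat.testBit_zero, Int.ofNat_eq_natCast]
               by_cases hn : n % 2 = 1 <;> simp [hn] <;> omega
  | negSucc n =>
      have h : ((Int.negSucc n) % 2 = 1) ↔ ¬(n % 2 = 1) := by
        rw [Int.negSucc_eq]; omega
      simp only [Int.testBit, Nat.testBit_zero]
      by_cases hn : n % 2 = 1 <;> simp [hn, h]

-- Int.testBit steps through floor division by 2
theorem pv_tbS (m : Int) (k : Nat) : Int.testBit m (k+1) = Int.testBit (m/2) k := by
  cases m with
  | ofNat n => rw [show ((Int.ofNat n)/2 : Int) = Int.ofNat (n/2) from rfl]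
               simp [Int.testBit, Nat.testBit_succ]
  | negSucc n => rw [show ((Int.negSucc n)/2 : Int) = Int.negSucc (n/2) from rfl]
                 simp [Int.testBit, Nat.testBit_succ]

theorem pv_one_shiftLeft (k : Nat) : (1 : Int) <<< k = ((2^k : Nat) : Int) := by
  rw [show (1 : Int) <<< k = ((1 <<< k : Nat) : Int) from rfl, Nat.shiftLeft_eq, one_mul]

theorem pv_shiftRight_eq (m : Int) (k : Nat) : m >>> k = m / ((2^k : Nat) : Int) := by
  rw [Int.shiftRight_eq_div_pow]

theorem pv_shiftRight_zero (m : Int) : m >>> (0:Nat) = m := by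
  rw [pv_shiftRight_eq]; simp

theorem pv_shiftRight_div2 (m : Int) (k : Nat) : (m >>> k) / 2 = m >>> (k+1) := by
  rw [pv_shiftRight_eq, pv_shiftRight_eq,
    Int.ediv_ediv_of_nonneg (by positivity : (0:Int) ≤ ((2^k : Nat) : Int))]
  congr 1

theorem pv_shiftRight_add (m : Int) (i j : Nat) : (m >>> i) >>> j = m >>> (i+j) := by
  induction j with
  | zero => simp
  | succ j ih => rw [← pv_shiftRight_div2, ih, pv_shiftRight_div2, Nat.add_assoc]

-- A's cell test: bitmask & (1 << k) ≠ 0  ↔  bit k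
theorem pv_cellA (m : Int) (k : Nat) : (PySem.Int.band m ((1 : Int) <<< k) != 0) = Int.testBit m k := by
  rw [pv_one_shiftLeft]
  cases m with
  | ofNat n =>
      rw [PySem.Int.band_of_nonneg (by rw [Int.ofNat_eq_natCast]; exact Int.natCast_nonneg n) (by positivity)]
      rw [show (Int.ofNat n).toNat = n from rfl, Int.toNat_natCast, Nat.and_two_pow]
      rw [show Int.testBit (Int.ofNat n) k = n.testBit k from rfl]
      cases hn : n.testBit k <;> simp
  | negSucc n =>
      rw [show PySem.Int.band (Int.negSucc n) ((2^k : Nat) : Int)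
            = ((2^k - (2^k &&& n) : Nat) : Int) from by
        simp only [PySem.Int.band]
        rw [if_neg (by omega), if_pos (by positivity)]
        congr 1
        rw [Int.toNat_natCast]
        congr 1
        rw [show -Int.negSucc n - 1 = (n : Int) from by rw [Int.negSucc_eq]; ring,
            Int.toNat_natCast]]
      rw [Nat.two_pow_and]
      rw [show Int.testBit (Int.negSucc n) k = !n.testBit k from rfl]
      cases hn : n.testBit k <;> simp

-- B's cell value: (m >> k) % 2 ≠ 0  ↔  bit k
theorem pv_cellB (m : Int) (k : Nat) : (PySem.Int.mod (m >>> k) 2 != 0) = Int.testBit m k := by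
  induction k generalizing m with
  | zero =>
      rw [pv_shiftRight_zero, pv_tb0, PySem.Int.mod_eq_emod_of_pos (by norm_num : (0:Int) < 2)]
      rcases Int.emod_two_eq m with h | h <;> simp [h]
  | succ k ih =>
      have h1 : m >>> (k+1) = (m/2) >>> k := by
        have h := pv_shiftRight_add m 1 k
        rw [show m >>> (1:Nat) = m / 2 from by
              rw [← pv_shiftRight_div2 m 0, pv_shiftRight_zero]] at h
        rw [h]
        congr 1
        omega
      rw [h1, ih, pv_tbS]

-- generic: fold appending singletons is init ++ map
theorem pv_foldl_app {α β : Type} (f : α → β) (xs : List α) (init : List β) :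
    xs.foldl (fun acc x => acc ++ [f x]) init = init ++ xs.map f := by
  induction xs generalizing init with
  | nil => simp
  | cons x xs ih => simp [ih]

theorem pv_pyRange_toNat (c : Int) : PySem.List.pyRange 0 c 1 = PySem.List.pyRange 0 (c.toNat : Int) 1 := by
  rw [PySem.List.pyRange_one, PySem.List.pyRange_one]
  congr 2
  omega

theorem pv_pyRange_map {β : Type} (n : Nat) (f : Int → β) :
    (PySem.List.pyRange 0 (n : Int) 1).map f = (List.range n).map (fun (k : Nat) => f (k : Int)) := by
  rw [PySem.List.pyRange_one, List.map_map]
  apply List.map_congr_left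
  intro a _
  simp

-- B's inner loop, fully characterised
theorem pv_innerB (n : Nat) (m : Int) (acc : List Bool) :
    (PySem.List.pyRange 0 (n : Int) 1).foldl (fun (st2 : Int × List Bool) _ =>
      (PySem.Int.floordiv st2.1 2, st2.2 ++ [PySem.Int.mod st2.1 2 != 0])) (m, acc)
    = (m >>> n, acc ++ (List.range n).map (fun (c : Nat) => PySem.Int.mod (m >>> c) 2 != 0)) := by
  induction n generalizing acc with
  | zero => rw [PySem.List.pyRange_one_eq_nil (by omega)]
            simp
  | succ n ih =>
      rw [show ((n+1 : Nat) : Int) = (n : Int) + 1 by push_cast; ring,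
          PySem.List.pyRange_one_succ_right (by positivity), List.foldl_append, ih]
      simp only [List.foldl_cons, List.foldl_nil, List.range_succ, List.map_append, List.map_cons,
        List.map_nil, List.append_assoc]
      refine Prod.ext ?_ rfl
      simp only
      rw [PySem.Int.floordiv_eq_ediv_of_pos (by norm_num : (0:Int) < 2), pv_shiftRight_div2]

-- B's outer loop, fully characterised (over Nat bounds)
theorem pv_outerB (C : Nat) (R : Nat) (m : Int) (acc : List (List Bool)) :
    (PySem.List.pyRange 0 (R : Int) 1).foldl (fun (st : Int × List (List Bool)) _ =>
      let inner := (PySem.List.pyRange 0 (C : Int) 1).foldl (fun (st2 : Int × List Bool) _ =>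
        (PySem.Int.floordiv st2.1 2, st2.2 ++ [PySem.Int.mod st2.1 2 != 0])) (st.1, [])
      (inner.1, st.2 ++ [inner.2])) (m, acc)
    = (m >>> (R*C), acc ++ (List.range R).map (fun (r : Nat) =>
        (List.range C).map (fun (c : Nat) => PySem.Int.mod (m >>> (r*C+c)) 2 != 0))) := by
  induction R generalizing acc with
  | zero =>
      rw [show PySem.List.pyRange 0 (((0:Nat) : Int)) 1 = [] from
            PySem.List.pyRange_one_eq_nil (by omega)]
      simp
  | succ R ih =>
      rw [show ((R+1 : Nat) : Int) = (R : Int) + 1 by push_cast; ring,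
          PySem.List.pyRange_one_succ_right (by positivity), List.foldl_append, ih]
      simp only [List.foldl_cons, List.foldl_nil, pv_innerB]
      refine Prod.ext ?_ ?_
      · simp only
        rw [pv_shiftRight_add]
        congr 1
        ring
      · simp only [List.range_succ, List.map_append, List.map_cons, List.map_nil,
          List.append_assoc, List.nil_append]
        congr 2
        congr 1
        apply List.map_congr_left
        intro c _
        rw [pv_shiftRight_add]

-- ===== VERDICT (by name: the statement is the Claim_ definition above) =====
theorem bits_to_2d_py_spec : Claim_equal_bits_to_2d_py := by
  intro bm rows cols _
  show bits_to_2d_py bm rows cols = bits_to_2d_py_alt bm rows cols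
  unfold bits_to_2d_py bits_to_2d_py_alt
  rw [pv_pyRange_toNat rows, pv_pyRange_toNat cols]
  set R := rows.toNat with hR
  set C := cols.toNat with hC
  rw [pv_outerB C R bm []]
  rw [pv_foldl_app (fun r => (PySem.List.pyRange 0 ((C:Nat) : Int) 1).foldl (fun row c =>
      row ++ [PySem.Int.band bm ((1 : Int) <<< (r * cols + c).toNat) != 0]) []) _ []]
  simp only [List.nil_append, pv_pyRange_map]
  apply List.map_congr_left
  intro r hr
  rw [pv_foldl_app (fun c => PySem.Int.band bm ((1 : Int) <<< ((r:Int) * cols + c).toNat) != 0) _ []]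
  simp only [List.nil_append, pv_pyRange_map]
  apply List.map_congr_left
  intro c hc
  rw [pv_cellA, pv_cellB bm (r*C+c)]
  congr 1
  have hc' : c < C := List.mem_range.mp hc
  by_cases h : 0 ≤ cols
  · have hcols : cols = (C : Int) := by rw [hC]; omega
    rw [hcols]
    have heq : ((r:Int)) * (C:Int) + (c:Int) = ((r*C+c : Nat) : Int) := by push_cast; ring
    rw [heq, Int.toNat_natCast]
  · exfalso
    have : C = 0 := by rw [hC]; omega
    omega
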